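-- pv_equiv track=rewrite | github.com/Bioinformatics-Specialization/Bioinformatics-2 | week2/create_contig.py | create_contigs
-- ===== SOURCE A (Python) =====
-- def merge(s1, s2):
--     i = 0
--     while not s2.startswith(s1[i:]):
--         i += 1
--     return s1[:i] + s2
--
-- def create_contigs(paths):
-- 	contigs = []
-- 	for path in paths:
-- 		i = 1
-- 		contig = path[0]
-- 		while(i<len(path)):
-- 			contig = merge(contig,path[i])
--
-- 			i+=1
-- 		contigs.append(contig)
-- 	return contigs
-- ===== SOURCE B (Python) =====
-- def merge(s1, s2):
--     # One left-to-right pass over s1, maintaining the list of all "live" match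
--     # lengths j: the last j chars seen so far equal s2[:j].  Kept in decreasing
--     # order, so live[0] is the longest suffix of s1 that is a prefix of s2.
--     m = len(s2)
--     live = [0]
--     for c in s1:
--         live = [j + 1 for j in live if j < m and s2[j] == c]
--         live.append(0)
--     k = live[0]
--     return s1 + s2[k:]
--
--
-- def assemble(path):
--     contig = path[0]
--     for s in path[1:]:
--         contig = merge(contig, s)
--     return contig
--
--
-- def create_contigs(paths):
--     return [assemble(path) for path in paths]
-- ===== Notes on version B (the rewrite author's own statement) =====
-- stated objective: alternative
-- what changed: merge's repeated startswith scan over shift positions is replaced by a single left-to-right pass over s1 that maintains the list of all live match lengths against s2 (an Aho-Corasick-style active-match set), whose head is the longest overlap; the result is then s1 + s2[k:].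
import Mathlib
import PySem

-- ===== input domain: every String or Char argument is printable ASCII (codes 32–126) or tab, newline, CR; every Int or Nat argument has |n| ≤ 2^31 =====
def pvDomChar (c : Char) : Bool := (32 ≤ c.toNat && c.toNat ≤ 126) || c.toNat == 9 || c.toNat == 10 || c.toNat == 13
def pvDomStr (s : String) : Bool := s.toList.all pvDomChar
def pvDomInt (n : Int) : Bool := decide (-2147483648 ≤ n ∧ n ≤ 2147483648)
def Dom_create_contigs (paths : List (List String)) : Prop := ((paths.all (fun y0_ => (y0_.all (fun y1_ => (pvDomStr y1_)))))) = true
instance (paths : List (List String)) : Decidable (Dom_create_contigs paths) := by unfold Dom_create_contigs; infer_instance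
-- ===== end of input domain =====

-- B replaces merge's repeated startswith scan over shift positions by a single pass
-- over s1 maintaining the list of all live match lengths against s2 (alternative
-- algorithm, same asymptotic cost).

-- ===== PORT A =====
-- while not s2.startswith(s1[i:]): i += 1   (terminates: s1[len(s1):] = "" is a prefix)
def merge_loop_a (s1 s2 : List Char) (i : Nat) : Nat :=
  if PySem.Chars.startswith s2 (PySem.Chars.slice s1 (some (i : Int)) none) then i
  else merge_loop_a s1 s2 (i + 1)
termination_by s1.length + 1 - i
decreasing_by
  rename_i h
  by_cases hi : i ≤ s1.length
  · omega
  · exfalso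
    apply h
    rw [PySem.Chars.startswith_iff, PySem.Chars.slice_eq_listSlice,
        PySem.List.slice_from_natCast, List.drop_eq_nil_of_le (by omega)]
    exact List.nil_prefix

def merge_a (s1 s2 : String) : String :=
  let i := merge_loop_a s1.toList s2.toList 0
  PySem.Str.slice s1 none (some (i : Int)) ++ s2

def assemble_a (path : List String) : String :=
  (PySem.List.pyRange 1 (path.length : Int) 1).foldl
    (fun contig j => merge_a contig (PySem.List.pyGetD path j ""))
    ((PySem.List.pyGet? path 0).getD "")

def create_contigs (paths : List (List String)) : List String :=
  paths.foldl (fun contigs path => contigs ++ [assemble_a path]) []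

-- ===== PORT B =====
-- live = [j+1 for j in live if j < m and s2[j] == c]; live.append(0)
def step_live (t : List Char) (live : List Nat) (c : Char) : List Nat :=
  (live.filterMap (fun j => if j < t.length ∧ t[j]? = some c then some (j + 1) else none)) ++ [0]

def merge_b (s1 s2 : String) : String :=
  let t := s2.toList
  let live := s1.toList.foldl (step_live t) [0]
  let k := live.headD 0
  s1 ++ PySem.Str.slice s2 (some (k : Int)) none

def assemble_b (path : List String) : String :=
  (PySem.List.slice path (some 1) none).foldl merge_b ((PySem.List.pyGet? path 0).getD "")

def create_contigs_alt (paths : List (List String)) : List String :=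
  paths.map assemble_b

-- ===== PRECONDITION & SPEC =====
-- Pre_ excludes inputs containing an empty path, on which both Pythons raise IndexError at path[0].
def Pre_create_contigs (paths : List (List String)) : Prop := ∀ path ∈ paths, path ≠ []
instance (paths : List (List String)) : Decidable (Pre_create_contigs paths) := by
  unfold Pre_create_contigs; infer_instance

def pvWitness_create_contigs : List (List String) := [["TAAT", "ATG"], ["GG"]]

def Spec_create_contigs (paths : List (List String)) (out : List String) : Prop := out = create_contigs_alt paths
instance (paths : List (List String)) (out : List String) : Decidable (Spec_create_contigs paths out) := by unfold Spec_create_contigs; infer_instance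

-- ===== CLAIM (what is proved, stated in full; the proofs are below) =====
def Claim_equal_create_contigs : Prop := ∀ (paths : List (List String)), Dom_create_contigs paths → Pre_create_contigs paths → Spec_create_contigs paths (create_contigs paths)

-- ===== LEMMAS AND PROOFS =====

-- m is an overlap length of p against t: the last m chars of p are the first m chars of t.
def Ov (p t : List Char) (m : Nat) : Prop :=
  m ≤ p.length ∧ m ≤ t.length ∧ p.drop (p.length - m) = t.take m

theorem ov_zero (p t : List Char) : Ov p t 0 := by
  refine ⟨Nat.zero_le _, Nat.zero_le _, ?_⟩
  simp

theorem ov_nil (t : List Char) (m : Nat) : Ov [] t m ↔ m = 0 := by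
  constructor
  · rintro ⟨h1, -, -⟩; simpa using h1
  · rintro rfl; exact ov_zero [] t

theorem ov_snoc (p t : List Char) (c : Char) (m : Nat) :
    Ov (p ++ [c]) t (m + 1) ↔ Ov p t m ∧ m < t.length ∧ t[m]? = some c := by
  constructor
  · rintro ⟨h1, h2, h3⟩
    simp only [List.length_append, List.length_singleton] at h1
    have hm : m ≤ p.length := by omega
    have hmt : m < t.length := by omega
    have hdrop : (p ++ [c]).drop (p.length + 1 - (m + 1)) = p.drop (p.length - m) ++ [c] := by
      rw [show p.length + 1 - (m + 1) = p.length - m by omega,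
          List.drop_append_of_le_length (by omega)]
    rw [List.length_append, List.length_singleton, hdrop, List.take_add_one] at h3
    have hgm : t[m]?.toList = [t[m]] := by simp [hmt]
    rw [hgm] at h3
    have := List.append_inj' h3 rfl
    have h2' : c = t[m] := by simpa using this.2
    refine ⟨⟨hm, by omega, this.1⟩, hmt, ?_⟩
    rw [List.getElem?_eq_getElem hmt, h2']
  · rintro ⟨⟨h1, h2, h3⟩, hmt, hc⟩
    refine ⟨by simp; omega, by omega, ?_⟩
    have hdrop : (p ++ [c]).drop ((p ++ [c]).length - (m + 1)) = p.drop (p.length - m) ++ [c] := by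
      rw [List.length_append, List.length_singleton,
          show p.length + 1 - (m + 1) = p.length - m by omega,
          List.drop_append_of_le_length (by omega)]
    rw [hdrop, List.take_add_one, h3, hc]
    simp

-- invariant carried by B's fold: live lists exactly the overlap lengths, strictly decreasing
def LiveInv (t p : List Char) (live : List Nat) : Prop :=
  live.Pairwise (· > ·) ∧ ∀ m, m ∈ live ↔ Ov p t m

theorem liveInv_init (t : List Char) : LiveInv t [] [0] := by
  refine ⟨by simp, fun m => ?_⟩
  rw [ov_nil]
  simp

theorem mem_step_live (t : List Char) (live : List Nat) (c : Char) (m : Nat) :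
    m ∈ step_live t live c ↔
      m = 0 ∨ (∃ j ∈ live, (j < t.length ∧ t[j]? = some c) ∧ m = j + 1) := by
  simp only [step_live, List.mem_append, List.mem_singleton, List.mem_filterMap]
  constructor
  · rintro (⟨j, hj, hf⟩ | h)
    · right
      by_cases hcond : j < t.length ∧ t[j]? = some c
      · rw [if_pos hcond] at hf
        exact ⟨j, hj, hcond, (Option.some_inj.mp hf).symm⟩
      · rw [if_neg hcond] at hf; cases hf
    · left; exact h
  · rintro (h | ⟨j, hj, hcond, rfl⟩)
    · right; exact h
    · left; exact ⟨j, hj, by rw [if_pos hcond]⟩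

theorem liveInv_step (t p : List Char) (live : List Nat) (c : Char)
    (h : LiveInv t p live) : LiveInv t (p ++ [c]) (step_live t live c) := by
  obtain ⟨hpw, hmem⟩ := h
  constructor
  · unfold step_live
    rw [List.pairwise_append]
    refine ⟨?_, by simp, ?_⟩
    · rw [List.pairwise_filterMap]
      refine hpw.imp ?_
      intro a b hab x hx y hy
      by_cases h1 : a < t.length ∧ t[a]? = some c
      · by_cases h2 : b < t.length ∧ t[b]? = some c
        · rw [if_pos h1] at hx
          rw [if_pos h2] at hy
          have hxa := Option.some_inj.mp hx
          have hyb := Option.some_inj.mp hy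
          omega
        · rw [if_neg h2] at hy
          simp at hy
      · rw [if_neg h1] at hx
        simp at hx
    · intro a ha b hb
      obtain ⟨j, -, hf⟩ := List.mem_filterMap.mp ha
      by_cases h1 : j < t.length ∧ t[j]? = some c
      · rw [if_pos h1] at hf
        have haj := Option.some_inj.mp hf
        simp at hb
        omega
      · rw [if_neg h1] at hf
        simp at hf
  · intro m
    rw [mem_step_live]
    rcases m with _ | m
    · simp [ov_zero]
    · rw [ov_snoc]
      constructor
      · rintro (h | ⟨j, hj, hcond, hm⟩)
        · omega
        · have : j = m := by omega
          subst this
          exact ⟨(hmem j).mp hj, hcond.1, hcond.2⟩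
      · rintro ⟨ho, h1, h2⟩
        exact Or.inr ⟨m, (hmem m).mpr ho, ⟨h1, h2⟩, rfl⟩

theorem liveInv_foldl (t : List Char) (cs : List Char) :
    ∀ (p : List Char) (live : List Nat), LiveInv t p live →
      LiveInv t (p ++ cs) (cs.foldl (step_live t) live) := by
  induction cs with
  | nil => intro p live h; simpa using h
  | cons c cs ih =>
    intro p live h
    have := ih (p ++ [c]) (step_live t live c) (liveInv_step t p live c h)
    simpa using this

-- the head of a live list under the invariant is the maximum overlap length
theorem liveInv_head (t p : List Char) (live : List Nat) (h : LiveInv t p live) :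
    Ov p t (live.headD 0) ∧ ∀ m, Ov p t m → m ≤ live.headD 0 := by
  obtain ⟨hpw, hmem⟩ := h
  have h0 : (0 : Nat) ∈ live := (hmem 0).mpr (ov_zero p t)
  cases live with
  | nil => simp at h0
  | cons a live =>
    rw [List.pairwise_cons] at hpw
    refine ⟨(hmem a).mp (List.mem_cons_self), ?_⟩
    intro m hm
    have := (hmem m).mpr hm
    rcases List.mem_cons.mp this with rfl | hmem'
    · simp
    · exact Nat.le_of_lt (hpw.1 m hmem')

-- A's scan returns the least shift, i.e. length minus the maximum overlap
theorem merge_loop_a_eq (s1 t : List Char) (K : Nat)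
    (hK : Ov s1 t K) (hmax : ∀ m, Ov s1 t m → m ≤ K) :
    ∀ n i, i ≤ s1.length - K → s1.length - K - i ≤ n → merge_loop_a s1 t i = s1.length - K := by
  intro n
  induction n with
  | zero =>
    intro i hi hn
    have : i = s1.length - K := by omega
    subst this
    rw [merge_loop_a, if_pos]
    rw [PySem.Chars.startswith_iff, PySem.Chars.slice_eq_listSlice,
        PySem.List.slice_from_natCast, hK.2.2]
    exact List.take_prefix _ _
  | succ n ih =>
    intro i hi hn
    by_cases he : i = s1.length - K
    · subst he
      rw [merge_loop_a, if_pos]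
      rw [PySem.Chars.startswith_iff, PySem.Chars.slice_eq_listSlice,
          PySem.List.slice_from_natCast, hK.2.2]
      exact List.take_prefix _ _
    · have hiK : i < s1.length - K := by omega
      have hKlen : K ≤ s1.length := hK.1
      rw [merge_loop_a, if_neg, ih (i + 1) (by omega) (by omega)]
      intro hpre
      rw [PySem.Chars.startswith_iff, PySem.Chars.slice_eq_listSlice,
          PySem.List.slice_from_natCast] at hpre
      have hov : Ov s1 t (s1.length - i) := by
        refine ⟨by omega, ?_, ?_⟩
        · have := hpre.length_le
          simpa using this
        · rw [show s1.length - (s1.length - i) = i by omega]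
          have := List.prefix_iff_eq_take.mp hpre
          rw [this]
          congr 1
          simp
      have := hmax _ hov
      omega

theorem overlap_append (a b : List Char) (K : Nat)
    (h : a.drop (a.length - K) = b.take K) :
    a.take (a.length - K) ++ b = a ++ b.drop K := by
  conv_lhs => rw [← List.take_append_drop K b]
  rw [← h, ← List.append_assoc, List.take_append_drop]

theorem merge_ab (s1 s2 : String) : merge_a s1 s2 = merge_b s1 s2 := by
  have hinv : LiveInv s2.toList s1.toList (s1.toList.foldl (step_live s2.toList) [0]) := by
    have := liveInv_foldl s2.toList s1.toList [] [0] (liveInv_init s2.toList)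
    simpa using this
  obtain ⟨hK, hmax⟩ := liveInv_head _ _ _ hinv
  have hloop : merge_loop_a s1.toList s2.toList 0
      = s1.toList.length - (s1.toList.foldl (step_live s2.toList) [0]).headD 0 :=
    merge_loop_a_eq s1.toList s2.toList _ hK hmax s1.toList.length 0 (Nat.zero_le _) (by omega)
  rw [← String.toList_inj]
  show (PySem.Str.slice s1 none (some ((merge_loop_a s1.toList s2.toList 0 : Nat) : Int)) ++ s2).toList
      = (s1 ++ PySem.Str.slice s2
          (some (((s1.toList.foldl (step_live s2.toList) [0]).headD 0 : Nat) : Int)) none).toList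
  rw [hloop]
  simp only [String.toList_append, PySem.Str.toList_slice, PySem.Chars.slice_eq_listSlice,
    PySem.List.slice_to_natCast, PySem.List.slice_from_natCast]
  exact overlap_append s1.toList s2.toList _ hK.2.2

theorem assemble_ab (path : List String) : assemble_a path = assemble_b path := by
  unfold assemble_a assemble_b
  rw [PySem.List.slice_from_one,
    PySem.List.foldl_pyRange_pyGetD' path "" merge_a ((PySem.List.pyGet? path 0).getD "")
      (by omega : (0 : Int) ≤ 1)]
  have hmb : merge_a = merge_b := funext fun a => funext fun b => merge_ab a b
  rw [hmb, Int.toNat_one, List.drop_one]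

theorem foldl_append_eq_map (paths : List (List String)) :
    ∀ acc : List String,
      paths.foldl (fun contigs path => contigs ++ [assemble_a path]) acc
        = acc ++ paths.map assemble_a := by
  induction paths with
  | nil => intro acc; simp
  | cons p ps ih => intro acc; simp [ih]

-- ===== VERDICT (by name: the statement is the Claim_ definition above) =====
theorem create_contigs_spec : Claim_equal_create_contigs := by
  intro paths _ _
  unfold Spec_create_contigs create_contigs create_contigs_alt
  rw [foldl_append_eq_map]
  simp only [List.nil_append]
  exact List.map_congr_left fun path _ => assemble_ab path
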